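-- pv_equiv track=rewrite | github.com/Shamrock13/fwaudit | src/flintlock/rule_quality.py | check_shadow_rules_pfsense
-- ===== SOURCE A (Python) =====
-- def _f(severity, category, message, remediation=""):
--     return {"severity": severity, "category": category, "message": message, "remediation": remediation}
--
-- def check_shadow_rules_pfsense(rules):
--     """Detect shadowed rules in a pfSense ruleset.
--
--     pfSense rules are grouped per interface and evaluated top-to-bottom.
--     The parser represents source/destination=any as the string "1".
--     """
--     findings = []
--
--     # Group by interface — pfSense evaluates rules per interface independently
--     by_intf: dict = {}
--     for r in rules:
--         intf = r.get("interface", "")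
--         by_intf.setdefault(intf, []).append(r)
--
--     for intf, intf_rules in by_intf.items():
--         active = []  # list of (name, src, dst, proto)
--
--         for r in intf_rules:
--             name  = r.get("descr") or "unnamed"
--             src   = r.get("source", "")
--             dst   = r.get("destination", "")
--             proto = (r.get("protocol") or "any").lower()
--
--             for e_name, e_src, e_dst, e_proto in active:
--                 src_covered   = (e_src == "1") or (e_src == src)
--                 dst_covered   = (e_dst == "1") or (e_dst == dst)
--                 proto_covered = (e_proto == "any") or (e_proto == proto)
--
--                 if src_covered and dst_covered and proto_covered:
--                     intf_label = intf or "unknown"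
--                     findings.append(_f(
--                         "HIGH", "redundancy",
--                         f"[HIGH] pfSense rule '{name}' (interface: {intf_label}) is shadowed by "
--                         f"earlier rule '{e_name}' — it will never match",
--                         f"Rule '{e_name}' precedes '{name}' on interface '{intf_label}' and "
--                         f"covers a superset of its source/destination/protocol scope. "
--                         f"Remove or reorder '{name}' to ensure it is evaluated as intended.",
--                     ))
--                     break
--
--             active.append((name, src, dst, proto))
--
--     return findings
-- ===== SOURCE B (Python) =====
-- def _f(severity, category, message, remediation=""):
--     return {"severity": severity, "category": category, "message": message, "remediation": remediation}
--
-- def check_shadow_rules_pfsense(rules):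
--     """Detect shadowed rules via a hash map of exact (src, dst, proto) keys:
--     for each rule probe the 8 wildcard combinations and pick the earliest match."""
--     findings = []
--
--     by_intf: dict = {}
--     for r in rules:
--         intf = r.get("interface", "")
--         by_intf.setdefault(intf, []).append(r)
--
--     for intf, intf_rules in by_intf.items():
--         first = {}  # (src, dst, proto) -> (position, name) of earliest rule with that exact key
--         pos = 0
--
--         for r in intf_rules:
--             name  = r.get("descr") or "unnamed"
--             src   = r.get("source", "")
--             dst   = r.get("destination", "")
--             proto = (r.get("protocol") or "any").lower()
--
--             best = None
--             for s in ("1", src):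
--                 for d in ("1", dst):
--                     for p in ("any", proto):
--                         cand = first.get((s, d, p))
--                         if cand is not None and (best is None or cand[0] < best[0]):
--                             best = cand
--
--             if best is not None:
--                 e_name = best[1]
--                 intf_label = intf or "unknown"
--                 findings.append(_f(
--                     "HIGH", "redundancy",
--                     f"[HIGH] pfSense rule '{name}' (interface: {intf_label}) is shadowed by "
--                     f"earlier rule '{e_name}' — it will never match",
--                     f"Rule '{e_name}' precedes '{name}' on interface '{intf_label}' and "
--                     f"covers a superset of its source/destination/protocol scope. "
--                     f"Remove or reorder '{name}' to ensure it is evaluated as intended.",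
--                 ))
--
--             k = (src, dst, proto)
--             if k not in first:
--                 first[k] = (pos, name)
--             pos += 1
--
--     return findings
-- ===== Notes on version B (the rewrite author's own statement) =====
-- stated objective: alternative
-- what changed: A's inner linear scan over all earlier rules of the interface is replaced by a hash map from exact (src, dst, proto) keys to the earliest rule with that key; each rule probes its 8 wildcard combinations and takes the match with minimal position.
import Mathlib
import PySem

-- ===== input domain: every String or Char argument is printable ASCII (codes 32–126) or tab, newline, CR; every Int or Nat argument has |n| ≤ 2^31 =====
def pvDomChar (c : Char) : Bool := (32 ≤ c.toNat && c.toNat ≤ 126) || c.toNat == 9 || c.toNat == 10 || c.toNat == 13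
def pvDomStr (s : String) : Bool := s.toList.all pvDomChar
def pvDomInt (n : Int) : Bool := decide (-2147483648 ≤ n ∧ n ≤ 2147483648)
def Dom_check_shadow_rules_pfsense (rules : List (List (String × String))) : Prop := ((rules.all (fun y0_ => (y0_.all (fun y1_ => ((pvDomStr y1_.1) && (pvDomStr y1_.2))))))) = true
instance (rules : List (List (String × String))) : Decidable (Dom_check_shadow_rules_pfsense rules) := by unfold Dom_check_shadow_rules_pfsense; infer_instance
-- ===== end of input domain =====

-- B replaces A's inner scan of all earlier rules on an interface by a hash map from exact
-- (src, dst, proto) keys to the earliest rule carrying that key: each rule probes its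
-- 8 wildcard combinations and takes the match with the minimal position.

-- ----- shared helpers (Python `_f`, the shared field extraction and message text) -----
-- Python `_f(severity, category, message, remediation)` building the finding dict
def pvF (severity category message remediation : String) : List (String × String) :=
  [("severity", severity), ("category", category), ("message", message), ("remediation", remediation)]

-- the `_f("HIGH", "redundancy", f"…", f"…")` call both Pythons make, f-strings as concatenation
def pvShadowMsg (name e_name intf_label : String) : List (String × String) :=
  pvF "HIGH" "redundancy"
    ("[HIGH] pfSense rule '" ++ name ++ "' (interface: " ++ intf_label ++ ") is shadowed by earlier rule '" ++ e_name ++ "' — it will never match")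
    ("Rule '" ++ e_name ++ "' precedes '" ++ name ++ "' on interface '" ++ intf_label ++ "' and covers a superset of its source/destination/protocol scope. Remove or reorder '" ++ name ++ "' to ensure it is evaluated as intended.")

-- r.get(k) / r.get(k, dflt) on the rule dict
def pvGet (r : List (String × String)) (k : String) : Option String := (PySem.Dict.mk r).get? k
def pvGetD (r : List (String × String)) (k dflt : String) : String := (PySem.Dict.mk r).getD k dflt

-- name = r.get("descr") or "unnamed"   (Python: None and "" are falsy)
def pvName (r : List (String × String)) : String :=
  match pvGet r "descr" with
  | some s => if s == "" then "unnamed" else s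
  | none => "unnamed"

-- proto = (r.get("protocol") or "any").lower()
def pvProto (r : List (String × String)) : String :=
  PySem.Str.lower (match pvGet r "protocol" with
                   | some s => if s == "" then "any" else s
                   | none => "any")

-- the tuple (name, src, dst, proto) both Pythons extract per rule
def pvEntry (r : List (String × String)) : String × String × String × String :=
  (pvName r, pvGetD r "source" "", pvGetD r "destination" "", pvProto r)

-- the grouping loop `by_intf.setdefault(r.get("interface",""), []).append(r)`, identical in both Pythons
def pvGroup (rules : List (List (String × String))) : PySem.Dict String (List (List (String × String))) :=
  rules.foldl (fun d r => d.modify (pvGetD r "interface" "") [] (· ++ [r])) PySem.Dict.empty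

-- ===== PORT A =====
-- inner `for e_name, e_src, e_dst, e_proto in active: … break` loop
def pvScanA (active : List (String × String × String × String)) (src dst proto : String) : Option String :=
  match active with
  | [] => none
  | e :: rest =>
    if (e.2.1 == "1" || e.2.1 == src) && (e.2.2.1 == "1" || e.2.2.1 == dst) && (e.2.2.2 == "any" || e.2.2.2 == proto) then
      some e.1
    else pvScanA rest src dst proto

-- `for r in intf_rules:` body, state = (active, findings)
def pvIntfA (intf : String) (rs : List (List (String × String)))
    (st : List (String × String × String × String) × List (List (String × String))) :
    List (String × String × String × String) × List (List (String × String)) :=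
  rs.foldl (fun st r =>
    let e := pvEntry r
    let fs := match pvScanA st.1 e.2.1 e.2.2.1 e.2.2.2 with
      | some en => st.2 ++ [pvShadowMsg e.1 en (if intf == "" then "unknown" else intf)]
      | none => st.2
    (st.1 ++ [e], fs)) st

def check_shadow_rules_pfsense (rules : List (List (String × String))) : List (List (String × String)) :=
  (pvGroup rules).items.foldl (fun findings p => (pvIntfA p.1 p.2 ([], findings)).2) []

-- ===== PORT B =====
-- the 8 wildcard combinations ("1"/src) × ("1"/dst) × ("any"/proto)
def pvProbes (src dst proto : String) : List (String × String × String) :=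
  ["1", src].flatMap fun s => ["1", dst].flatMap fun d => ["any", proto].map fun p => (s, d, p)

-- `best = None; for key in probes: cand = first.get(key); if cand and (best is None or cand[0] < best[0]): best = cand`
def pvFoldBest (m : (String × String × String) → Option (Nat × String))
    (ps : List (String × String × String)) (b : Option (Nat × String)) : Option (Nat × String) :=
  ps.foldl (fun best k =>
    match m k with
    | some cand =>
      match best with
      | none => some cand
      | some bb => if cand.1 < bb.1 then some cand else some bb
    | none => best) b

def pvProbeB (first : PySem.Dict (String × String × String) (Nat × String)) (src dst proto : String) :
    Option (Nat × String) :=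
  pvFoldBest (fun k => first.get? k) (pvProbes src dst proto) none

-- `for r in intf_rules:` body, state = (first, pos, findings)
def pvIntfB (intf : String) (rs : List (List (String × String)))
    (st : PySem.Dict (String × String × String) (Nat × String) × Nat × List (List (String × String))) :
    PySem.Dict (String × String × String) (Nat × String) × Nat × List (List (String × String)) :=
  rs.foldl (fun st r =>
    let e := pvEntry r
    let fs := match pvProbeB st.1 e.2.1 e.2.2.1 e.2.2.2 with
      | some b => st.2.2 ++ [pvShadowMsg e.1 b.2 (if intf == "" then "unknown" else intf)]
      | none => st.2.2
    let first := if st.1.contains (e.2.1, e.2.2.1, e.2.2.2) then st.1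
                 else st.1.insert (e.2.1, e.2.2.1, e.2.2.2) (st.2.1, e.1)
    (first, st.2.1 + 1, fs)) st

def check_shadow_rules_pfsense_alt (rules : List (List (String × String))) : List (List (String × String)) :=
  (pvGroup rules).items.foldl (fun findings p => (pvIntfB p.1 p.2 (PySem.Dict.empty, 0, findings)).2.2) []

-- ===== PRECONDITION & SPEC =====
def Spec_check_shadow_rules_pfsense (rules : List (List (String × String))) (out : List (List (String × String))) : Prop := out = check_shadow_rules_pfsense_alt rules
instance (rules : List (List (String × String))) (out : List (List (String × String))) : Decidable (Spec_check_shadow_rules_pfsense rules out) := by unfold Spec_check_shadow_rules_pfsense; infer_instance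

-- ===== CLAIM (what is proved, stated in full; the proofs are below) =====
def Claim_equal_check_shadow_rules_pfsense : Prop := ∀ (rules : List (List (String × String))), Dom_check_shadow_rules_pfsense rules → Spec_check_shadow_rules_pfsense rules (check_shadow_rules_pfsense rules)

-- ===== LEMMAS AND PROOFS =====

-- first position (counted from offset o) and name among `as` of an entry with EXACT key k
def pvMOf : List (String × String × String × String) → Nat → (String × String × String) → Option (Nat × String)
  | [], _, _ => none
  | e :: es, o, k => if (e.2.1, e.2.2.1, e.2.2.2) = k then some (o, e.1) else pvMOf es (o + 1) k

-- first position (from offset o) and name among `as` of an entry COVERING (src, dst, proto)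
def pvScanPos : List (String × String × String × String) → Nat → String → String → String → Option (Nat × String)
  | [], _, _, _, _ => none
  | e :: es, o, src, dst, proto =>
    if (e.2.1 == "1" || e.2.1 == src) && (e.2.2.1 == "1" || e.2.2.1 == dst) && (e.2.2.2 == "any" || e.2.2.2 == proto) then
      some (o, e.1)
    else pvScanPos es (o + 1) src dst proto

theorem pvScanPos_map (as : List (String × String × String × String)) (o : Nat) (src dst proto : String) :
    (pvScanPos as o src dst proto).map (·.2) = pvScanA as src dst proto := by
  induction as generalizing o with
  | nil => rfl
  | cons e es ih =>
    simp only [pvScanPos, pvScanA]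
    split <;> simp [ih]

theorem pvCovers_mem (e : String × String × String × String) (src dst proto : String) :
    ((e.2.1 == "1" || e.2.1 == src) && (e.2.2.1 == "1" || e.2.2.1 == dst) && (e.2.2.2 == "any" || e.2.2.2 == proto)) = true
      ↔ (e.2.1, e.2.2.1, e.2.2.2) ∈ pvProbes src dst proto := by
  simp [pvProbes, Prod.ext_iff]
  tauto

theorem pvMOf_ge (as : List (String × String × String × String)) (o : Nat) (k : String × String × String)
    (c : Nat × String) (h : pvMOf as o k = some c) : o ≤ c.1 := by
  induction as generalizing o with
  | nil => simp [pvMOf] at h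
  | cons e es ih =>
    simp only [pvMOf] at h
    split at h
    · cases h; simp
    · exact Nat.le_of_succ_le (ih (o + 1) h)

theorem pvMOf_append (as : List (String × String × String × String))
    (e : String × String × String × String) (o : Nat) (k : String × String × String) :
    pvMOf (as ++ [e]) o k =
      match pvMOf as o k with
      | some c => some c
      | none => if (e.2.1, e.2.2.1, e.2.2.2) = k then some (o + as.length, e.1) else none := by
  induction as generalizing o with
  | nil => simp [pvMOf]
  | cons a as ih =>
    simp only [List.cons_append, pvMOf]
    split
    · rfl
    · rw [ih]
      simp only [List.length_cons]
      have : o + 1 + as.length = o + (as.length + 1) := by omega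
      rw [this]

theorem pvFoldBest_congr (ps : List (String × String × String))
    (m m' : (String × String × String) → Option (Nat × String)) (b : Option (Nat × String))
    (h : ∀ k ∈ ps, m k = m' k) : pvFoldBest m ps b = pvFoldBest m' ps b := by
  induction ps generalizing b with
  | nil => rfl
  | cons k ps ih =>
    simp only [pvFoldBest, List.foldl_cons] at *
    rw [h k (List.mem_cons_self)]
    exact ih _ (fun k hk => h k (List.mem_cons_of_mem _ hk))

theorem pvFoldBest_none (ps : List (String × String × String))
    (m : (String × String × String) → Option (Nat × String)) (b : Option (Nat × String))
    (h : ∀ k ∈ ps, m k = none) : pvFoldBest m ps b = b := by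
  induction ps generalizing b with
  | nil => rfl
  | cons k ps ih =>
    simp only [pvFoldBest, List.foldl_cons] at *
    rw [h k (List.mem_cons_self)]
    exact ih _ (fun k hk => h k (List.mem_cons_of_mem _ hk))

theorem pvFoldBest_min (ps : List (String × String × String))
    (m : (String × String × String) → Option (Nat × String)) (v : Nat × String) :
    ∀ (b : Option (Nat × String)),
      (b = some v ∨ ∃ k ∈ ps, m k = some v) →
      (∀ c, b = some c → c = v ∨ v.1 < c.1) →
      (∀ k ∈ ps, ∀ c, m k = some c → c = v ∨ v.1 < c.1) →
      pvFoldBest m ps b = some v := by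
  induction ps with
  | nil =>
    intro b hmem _ _
    rcases hmem with h | ⟨k, hk, _⟩
    · exact h
    · simp at hk
  | cons k ps ih =>
    intro b hmem hb hmin
    have hmin' : ∀ k ∈ ps, ∀ c, m k = some c → c = v ∨ v.1 < c.1 :=
      fun k hk => hmin k (List.mem_cons_of_mem _ hk)
    simp only [pvFoldBest, List.foldl_cons] at ih ⊢
    cases hmk : m k with
    | none =>
      refine ih b ?_ hb hmin'
      rcases hmem with h | ⟨k', hk', hv⟩
      · exact Or.inl h
      · rcases List.mem_cons.mp hk' with rfl | hk''
        · rw [hmk] at hv; cases hv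
        · exact Or.inr ⟨k', hk'', hv⟩
    | some cand =>
      have hcv := hmin k (List.mem_cons_self) cand hmk
      cases b with
      | none =>
        rcases hcv with rfl | hlt
        · exact ih (some cand) (Or.inl rfl)
            (fun c hc => by rw [Option.some_inj] at hc; exact Or.inl hc.symm) hmin'
        · rcases hmem with h | ⟨k', hk', hv⟩
          · cases h
          · rcases List.mem_cons.mp hk' with rfl | hk''
            · rw [hmk, Option.some_inj] at hv
              rw [hv] at hlt; omega
            · exact ih (some cand) (Or.inr ⟨k', hk'', hv⟩)
                (fun c hc => by rw [Option.some_inj] at hc; exact Or.inr (hc ▸ hlt)) hmin'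
      | some bb =>
        have hbb := hb bb rfl
        by_cases hcb : cand.1 < bb.1
        · refine ih (if cand.1 < bb.1 then some cand else some bb) ?_ ?_ hmin'
          · rw [if_pos hcb]
            rcases hcv with rfl | hlt
            · exact Or.inl rfl
            · rcases hmem with h | ⟨k', hk', hv⟩
              · rw [Option.some_inj] at h
                rw [h] at hcb; omega
              · rcases List.mem_cons.mp hk' with rfl | hk''
                · rw [hmk, Option.some_inj] at hv
                  rw [hv] at hlt; omega
                · exact Or.inr ⟨k', hk'', hv⟩
          · intro c hc
            rw [if_pos hcb, Option.some_inj] at hc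
            exact hc ▸ hcv
        · refine ih (if cand.1 < bb.1 then some cand else some bb) ?_ ?_ hmin'
          · rw [if_neg hcb]
            rcases hmem with h | ⟨k', hk', hv⟩
            · exact Or.inl h
            · rcases List.mem_cons.mp hk' with rfl | hk''
              · rw [hmk, Option.some_inj] at hv
                rcases hbb with rfl | hvbb
                · exact Or.inl rfl
                · rw [hv] at hcb; omega
              · exact Or.inr ⟨k', hk'', hv⟩
          · intro c hc
            rw [if_neg hcb, Option.some_inj] at hc
            exact hc ▸ hbb

theorem pvProbe_eq_scan (as : List (String × String × String × String)) (o : Nat) (src dst proto : String) :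
    pvFoldBest (fun k => pvMOf as o k) (pvProbes src dst proto) none = pvScanPos as o src dst proto := by
  induction as generalizing o with
  | nil => exact pvFoldBest_none _ _ _ (fun k _ => rfl)
  | cons e es ih =>
    simp only [pvScanPos]
    by_cases hc : ((e.2.1 == "1" || e.2.1 == src) && (e.2.2.1 == "1" || e.2.2.1 == dst) && (e.2.2.2 == "any" || e.2.2.2 == proto)) = true
    · rw [if_pos hc]
      refine pvFoldBest_min _ _ _ none ?_ ?_ ?_
      · refine Or.inr ⟨(e.2.1, e.2.2.1, e.2.2.2), (pvCovers_mem e src dst proto).mp hc, ?_⟩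
        simp [pvMOf]
      · intro c hc'; cases hc'
      · intro k _ c hmk
        simp only [pvMOf] at hmk
        split at hmk
        · cases hmk; exact Or.inl rfl
        · exact Or.inr (Nat.lt_of_succ_le (pvMOf_ge es (o + 1) k c hmk))
    · rw [if_neg hc]
      rw [pvFoldBest_congr _ (fun k => pvMOf (e :: es) o k) (fun k => pvMOf es (o + 1) k) none ?_]
      · exact ih (o + 1)
      · intro k hk
        simp only [pvMOf]
        rw [if_neg]
        intro he
        exact hc ((pvCovers_mem e src dst proto).mpr (he ▸ hk))

-- the per-rule state update preserves the map invariant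
theorem pvInv_step (first : PySem.Dict (String × String × String) (Nat × String))
    (active : List (String × String × String × String)) (e : String × String × String × String)
    (hinv : ∀ k, first.get? k = pvMOf active 0 k) (k : String × String × String) :
    (if first.contains (e.2.1, e.2.2.1, e.2.2.2) then first
     else first.insert (e.2.1, e.2.2.1, e.2.2.2) (active.length, e.1)).get? k
      = pvMOf (active ++ [e]) 0 k := by
  rw [pvMOf_append]
  by_cases hcon : first.contains (e.2.1, e.2.2.1, e.2.2.2) = true
  · rw [if_pos hcon]
    rw [PySem.Dict.contains_eq_isSome_get?, hinv] at hcon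
    cases hmk : pvMOf active 0 k with
    | some c => rw [hinv, hmk]
    | none =>
      rw [hinv, hmk]
      rw [if_neg]
      intro he
      rw [he, hmk] at hcon
      simp at hcon
  · rw [if_neg hcon]
    rw [PySem.Dict.get?_insert]
    by_cases hk : k = (e.2.1, e.2.2.1, e.2.2.2)
    · rw [if_pos hk]
      rw [Bool.not_eq_true, PySem.Dict.contains_eq_isSome_get?, hinv] at hcon
      rw [hk] at *
      cases hmk : pvMOf active 0 (e.2.1, e.2.2.1, e.2.2.2) with
      | some c => rw [hmk] at hcon; simp at hcon
      | none => simp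
    · rw [if_neg hk, hinv]
      cases pvMOf active 0 k with
      | some c => rfl
      | none =>
        rw [if_neg]
        exact fun he => hk he.symm

-- the probe fold over a map satisfying the invariant computes exactly A's first-cover scan
theorem pvProbeB_eq (first : PySem.Dict (String × String × String) (Nat × String))
    (active : List (String × String × String × String)) (src dst proto : String)
    (hinv : ∀ k, first.get? k = pvMOf active 0 k) :
    pvProbeB first src dst proto = pvScanPos active 0 src dst proto := by
  unfold pvProbeB
  rw [pvFoldBest_congr _ _ (fun k => pvMOf active 0 k) none (fun k _ => hinv k)]
  exact pvProbe_eq_scan active 0 src dst proto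

-- per-interface loop equivalence
theorem pvIntf_eq (intf : String) (rs : List (List (String × String)))
    (active : List (String × String × String × String))
    (first : PySem.Dict (String × String × String) (Nat × String))
    (fs : List (List (String × String)))
    (hinv : ∀ k, first.get? k = pvMOf active 0 k) :
    (pvIntfA intf rs (active, fs)).2 = (pvIntfB intf rs (first, active.length, fs)).2.2 := by
  induction rs generalizing active first fs with
  | nil => rfl
  | cons r rs ih =>
    have hfs : (match pvScanA active (pvEntry r).2.1 (pvEntry r).2.2.1 (pvEntry r).2.2.2 with
        | some en => fs ++ [pvShadowMsg (pvEntry r).1 en (if intf == "" then "unknown" else intf)]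
        | none => fs)
      = (match pvProbeB first (pvEntry r).2.1 (pvEntry r).2.2.1 (pvEntry r).2.2.2 with
        | some b => fs ++ [pvShadowMsg (pvEntry r).1 b.2 (if intf == "" then "unknown" else intf)]
        | none => fs) := by
      rw [pvProbeB_eq first active _ _ _ hinv,
          ← pvScanPos_map active 0 (pvEntry r).2.1 (pvEntry r).2.2.1 (pvEntry r).2.2.2]
      cases pvScanPos active 0 (pvEntry r).2.1 (pvEntry r).2.2.1 (pvEntry r).2.2.2 <;> rfl
    have hstepA : pvIntfA intf (r :: rs) (active, fs)
        = pvIntfA intf rs (active ++ [pvEntry r],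
            (match pvScanA active (pvEntry r).2.1 (pvEntry r).2.2.1 (pvEntry r).2.2.2 with
             | some en => fs ++ [pvShadowMsg (pvEntry r).1 en (if intf == "" then "unknown" else intf)]
             | none => fs)) := rfl
    have hstepB : pvIntfB intf (r :: rs) (first, active.length, fs)
        = pvIntfB intf rs
            ((if first.contains ((pvEntry r).2.1, (pvEntry r).2.2.1, (pvEntry r).2.2.2) then first
              else first.insert ((pvEntry r).2.1, (pvEntry r).2.2.1, (pvEntry r).2.2.2) (active.length, (pvEntry r).1)),
             active.length + 1,
             (match pvProbeB first (pvEntry r).2.1 (pvEntry r).2.2.1 (pvEntry r).2.2.2 with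
              | some b => fs ++ [pvShadowMsg (pvEntry r).1 b.2 (if intf == "" then "unknown" else intf)]
              | none => fs)) := rfl
    rw [hstepA, hstepB, hfs]
    have hlen : active.length + 1 = (active ++ [pvEntry r]).length := by simp
    rw [hlen]
    exact ih _ _ _ (pvInv_step first active (pvEntry r) hinv)

theorem pvOuter_eq (items : List (String × List (List (String × String))))
    (fs : List (List (String × String))) :
    items.foldl (fun findings p => (pvIntfA p.1 p.2 ([], findings)).2) fs
      = items.foldl (fun findings p => (pvIntfB p.1 p.2 (PySem.Dict.empty, 0, findings)).2.2) fs := by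
  induction items generalizing fs with
  | nil => rfl
  | cons p items ih =>
    simp only [List.foldl_cons]
    rw [pvIntf_eq p.1 p.2 [] PySem.Dict.empty fs (fun k => by simp [pvMOf, PySem.Dict.get?_empty])]
    exact ih _

-- ===== VERDICT (by name: the statement is the Claim_ definition above) =====
theorem check_shadow_rules_pfsense_spec : Claim_equal_check_shadow_rules_pfsense := by
  intro rules _
  unfold Spec_check_shadow_rules_pfsense check_shadow_rules_pfsense check_shadow_rules_pfsense_alt
  exact pvOuter_eq (pvGroup rules).items []
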